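-- pv_equiv track=rewrite | github.com/JuneJe0n/Collec_AI | model/tag.py | classify_tags
-- ===== SOURCE A (Python) =====
-- def classify_tags(tags):
--     shop_keywords = {
--         "accessory", "bag", "clothing", "fashion", "fashion accessory",
--         "luggage and bags", "fashion design", "dress",
--         "cosmetics", "footwear", "furniture", "online advertising"
--     }
--     place_keywords= {
--         "sky", "outdoor", "cloud", "building", "lighthouse", "night",
--         "landmark", "city", "road", "mountain", "ground", "tree", "water",
--         "beach", "plant", "nature", "sunset", "crosswalk", "way",
--         "architecture", "street", "vehicle"
--     }
--     animal_keywords= {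
--         "indoor", "animal", "pet", "mammal", "dog", "cat", "hamster",
--         "rodent", "rat", "bird", "small to medium-sized cats",
--         "outdoor", "pigeon", "ground", "feather", "amphibian",
--         "reptile", "terrier", "whiskers"
--     }
--     people_keywords= {
--         "human face", "person", "woman", "man", "smile", "footwear",
--         "girl", "boy", "group", "collage", "lip", "tooth", "eyelash",
--         "wall", "hat"
--     }
--     tags = [tag.lower() for tag in tags]
--     tags_set = set(tags)
--
--     if tags_set & shop_keywords:
--         category = "쇼핑 & 구매"
--     elif tags_set & place_keywords:
--         category = "장소"
--     elif tags_set & animal_keywords: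
--         category = "동물"
--     elif tags_set & people_keywords:
--         category = "사람 & 인물"
--     else:
--         category = "기타"
--
--     return category
-- ===== SOURCE B (Python) =====
-- _SHOP = frozenset({
--     "accessory", "bag", "clothing", "fashion", "fashion accessory",
--     "luggage and bags", "fashion design", "dress",
--     "cosmetics", "footwear", "furniture", "online advertising"
-- })
-- _PLACE = frozenset({
--     "sky", "outdoor", "cloud", "building", "lighthouse", "night",
--     "landmark", "city", "road", "mountain", "ground", "tree", "water",
--     "beach", "plant", "nature", "sunset", "crosswalk", "way",
--     "architecture", "street", "vehicle"
-- })
-- _ANIMAL = frozenset({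
--     "indoor", "animal", "pet", "mammal", "dog", "cat", "hamster",
--     "rodent", "rat", "bird", "small to medium-sized cats",
--     "outdoor", "pigeon", "ground", "feather", "amphibian",
--     "reptile", "terrier", "whiskers"
-- })
-- _PEOPLE = frozenset({
--     "human face", "person", "woman", "man", "smile", "footwear",
--     "girl", "boy", "group", "collage", "lip", "tooth", "eyelash",
--     "wall", "hat"
-- })
-- _LABELS = ["쇼핑 & 구매", "장소", "동물", "사람 & 인물", "기타"]
--
--
-- def _rank(tag):
--     """Priority rank of one lowercased tag; 4 = no category."""
--     if tag in _SHOP: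
--         return 0
--     if tag in _PLACE:
--         return 1
--     if tag in _ANIMAL:
--         return 2
--     if tag in _PEOPLE:
--         return 3
--     return 4
--
--
-- def classify_tags(tags):
--     best = 4
--     for tag in tags:
--         best = min(best, _rank(tag.lower()))
--     return _LABELS[best]
-- ===== Notes on version B (the rewrite author's own statement) =====
-- stated objective: alternative
-- what changed: Replaces building a set of the lowered tags and testing four set intersections in an elif chain by a per-tag priority-rank function and a single running-minimum pass over the tags, indexing the label out of a list at the end.
import Mathlib
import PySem

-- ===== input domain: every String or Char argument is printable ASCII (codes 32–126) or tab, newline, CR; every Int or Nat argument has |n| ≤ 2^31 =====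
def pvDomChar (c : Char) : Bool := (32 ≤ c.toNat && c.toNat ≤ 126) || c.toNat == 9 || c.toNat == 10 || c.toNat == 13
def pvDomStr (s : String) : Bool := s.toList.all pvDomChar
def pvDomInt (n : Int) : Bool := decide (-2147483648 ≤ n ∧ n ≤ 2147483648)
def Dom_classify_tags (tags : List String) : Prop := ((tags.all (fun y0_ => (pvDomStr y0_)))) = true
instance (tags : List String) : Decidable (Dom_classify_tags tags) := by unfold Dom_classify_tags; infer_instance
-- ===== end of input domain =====

-- B replaces A's "build a set of lowered tags, test four set intersections in an elif chain"
-- by a per-tag priority-rank function reduced with a single running minimum, then a label-list index.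


-- shared literal keyword data (same literals appear in both Pythons)
def shopKeywords : List String :=
  ["accessory", "bag", "clothing", "fashion", "fashion accessory",
   "luggage and bags", "fashion design", "dress",
   "cosmetics", "footwear", "furniture", "online advertising"]
def placeKeywords : List String :=
  ["sky", "outdoor", "cloud", "building", "lighthouse", "night",
   "landmark", "city", "road", "mountain", "ground", "tree", "water",
   "beach", "plant", "nature", "sunset", "crosswalk", "way",
   "architecture", "street", "vehicle"]
def animalKeywords : List String :=
  ["indoor", "animal", "pet", "mammal", "dog", "cat", "hamster",
   "rodent", "rat", "bird", "small to medium-sized cats",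
   "outdoor", "pigeon", "ground", "feather", "amphibian",
   "reptile", "terrier", "whiskers"]
def peopleKeywords : List String :=
  ["human face", "person", "woman", "man", "smile", "footwear",
   "girl", "boy", "group", "collage", "lip", "tooth", "eyelash",
   "wall", "hat"]

-- ===== PORT A =====
def classify_tags (tags : List String) : String :=
  let shop_keywords : PySem.Set String := PySem.Set.ofList shopKeywords
  let place_keywords : PySem.Set String := PySem.Set.ofList placeKeywords
  let animal_keywords : PySem.Set String := PySem.Set.ofList animalKeywords
  let people_keywords : PySem.Set String := PySem.Set.ofList peopleKeywords
  let tags' := tags.map PySem.Str.lower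
  let tags_set : PySem.Set String := PySem.Set.ofList tags'
  if PySem.Set.inter tags_set shop_keywords ≠ [] then "쇼핑 & 구매"
  else if PySem.Set.inter tags_set place_keywords ≠ [] then "장소"
  else if PySem.Set.inter tags_set animal_keywords ≠ [] then "동물"
  else if PySem.Set.inter tags_set people_keywords ≠ [] then "사람 & 인물"
  else "기타"

-- ===== PORT B =====
def labelsB : List String := ["쇼핑 & 구매", "장소", "동물", "사람 & 인물", "기타"]

def rankOf (tag : String) : Int :=
  if PySem.Set.contains (PySem.Set.ofList shopKeywords) tag then 0
  else if PySem.Set.contains (PySem.Set.ofList placeKeywords) tag then 1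
  else if PySem.Set.contains (PySem.Set.ofList animalKeywords) tag then 2
  else if PySem.Set.contains (PySem.Set.ofList peopleKeywords) tag then 3
  else 4

def classify_tags_alt (tags : List String) : String :=
  let best := tags.foldl (fun b tag => min b (rankOf (PySem.Str.lower tag))) 4
  -- _LABELS[best]: best is always in range (0 ≤ best ≤ 4), so the none branch is unreachable
  match PySem.List.pyGet? labelsB best with
  | some s => s
  | none => ""

-- ===== PRECONDITION & SPEC =====
def Spec_classify_tags (tags : List String) (out : String) : Prop := out = classify_tags_alt tags
instance (tags : List String) (out : String) : Decidable (Spec_classify_tags tags out) := by unfold Spec_classify_tags; infer_instance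

-- ===== CLAIM (what is proved, stated in full; the proofs are below) =====
def Claim_equal_classify_tags : Prop := ∀ (tags : List String), Dom_classify_tags tags → Spec_classify_tags tags (classify_tags tags)

-- ===== LEMMAS AND PROOFS =====

-- the rank of one tag, as a function of its four membership booleans
def rankChain (b0 b1 b2 b3 : Bool) : Int :=
  if b0 then 0 else if b1 then 1 else if b2 then 2 else if b3 then 3 else 4

lemma rankOf_eq_chain (t : String) :
    rankOf t = rankChain (PySem.Set.contains (PySem.Set.ofList shopKeywords) t)
      (PySem.Set.contains (PySem.Set.ofList placeKeywords) t)
      (PySem.Set.contains (PySem.Set.ofList animalKeywords) t)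
      (PySem.Set.contains (PySem.Set.ofList peopleKeywords) t) := rfl

lemma min_rankChain (c0 c1 c2 c3 d0 d1 d2 d3 : Bool) :
    min (rankChain c0 c1 c2 c3) (rankChain d0 d1 d2 d3)
      = rankChain (c0 || d0) (c1 || d1) (c2 || d2) (c3 || d3) := by
  revert c0 c1 c2 c3 d0 d1 d2 d3; decide

lemma foldl_min_shift (l : List String) (f : String → Int) :
    ∀ b c : Int, l.foldl (fun acc t => min acc (f t)) (min b c)
      = min b (l.foldl (fun acc t => min acc (f t)) c) := by
  induction l with
  | nil => intro b c; rfl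
  | cons t l ih =>
      intro b c
      simp only [List.foldl_cons, min_assoc]
      exact ih b (min c (f t))

lemma foldl_min_rank (tags : List String) :
    tags.foldl (fun b tag => min b (rankOf (PySem.Str.lower tag))) 4
      = rankChain
          (tags.any fun t => PySem.Set.contains (PySem.Set.ofList shopKeywords) (PySem.Str.lower t))
          (tags.any fun t => PySem.Set.contains (PySem.Set.ofList placeKeywords) (PySem.Str.lower t))
          (tags.any fun t => PySem.Set.contains (PySem.Set.ofList animalKeywords) (PySem.Str.lower t))
          (tags.any fun t => PySem.Set.contains (PySem.Set.ofList peopleKeywords) (PySem.Str.lower t)) := by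
  induction tags with
  | nil => rfl
  | cons t l ih =>
      have hle : min (4 : Int) (rankOf (PySem.Str.lower t)) = min (rankOf (PySem.Str.lower t)) 4 :=
        min_comm _ _
      simp only [List.foldl_cons, List.any_cons]
      rw [hle, foldl_min_shift l (fun tag => rankOf (PySem.Str.lower tag)) _ 4, ih,
        rankOf_eq_chain, min_rankChain]

lemma inter_ne_nil_iff (tags' : List String) (K : List String) :
    PySem.Set.inter (PySem.Set.ofList tags') (PySem.Set.ofList K) ≠ []
      ↔ (tags'.any fun t => PySem.Set.contains (PySem.Set.ofList K) t) = true := by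
  rw [← List.isEmpty_eq_false_iff, List.isEmpty_eq_false_iff_exists_mem]
  simp only [List.any_eq_true, PySem.Set.contains_iff, PySem.Set.mem_inter, PySem.Set.mem_ofList]

-- ===== VERDICT (by name: the statement is the Claim_ definition above) =====
theorem classify_tags_spec : Claim_equal_classify_tags := by
  intro tags _
  show classify_tags tags = classify_tags_alt tags
  unfold classify_tags classify_tags_alt
  rw [foldl_min_rank]
  simp only [inter_ne_nil_iff, List.any_map, Function.comp_def]
  rcases h0 : (tags.any fun t => PySem.Set.contains (PySem.Set.ofList shopKeywords) (PySem.Str.lower t)) <;>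
  rcases h1 : (tags.any fun t => PySem.Set.contains (PySem.Set.ofList placeKeywords) (PySem.Str.lower t)) <;>
  rcases h2 : (tags.any fun t => PySem.Set.contains (PySem.Set.ofList animalKeywords) (PySem.Str.lower t)) <;>
  rcases h3 : (tags.any fun t => PySem.Set.contains (PySem.Set.ofList peopleKeywords) (PySem.Str.lower t)) <;>
    simp [rankChain, labelsB, PySem.List.pyGet?] <;> rfl
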